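-- pv_equiv track=rewrite | github.com/pintom/google-foobar | Challenges/Challenge 2/solution.py | answer
-- ===== SOURCE A (Python) =====
-- def answer(x, y):
--     id = sum(range(x+1))
--     if y == 1:
--         return id
--     if y == 2:
--         id += x
--         return id
--     else:
--         while y > 1:
--             id += x
--             x += 1
--             y -= 1
--     return id
-- ===== SOURCE B (Python) =====
-- def answer(x, y):
--     base = x * (x + 1) // 2 if x >= 0 else 0
--     if y >= 2:
--         base += (y - 1) * x + (y - 1) * (y - 2) // 2
--     return base
-- ===== Notes on version B (the rewrite author's own statement) =====
-- stated objective: faster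
-- what changed: Replaced A's sum(range(x+1)) scan and the while loop that adds x, x+1, ..., x+y-2 by the closed-form triangular-number formulas x*(x+1)//2 and (y-1)*x + (y-1)*(y-2)//2.
import Mathlib
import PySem

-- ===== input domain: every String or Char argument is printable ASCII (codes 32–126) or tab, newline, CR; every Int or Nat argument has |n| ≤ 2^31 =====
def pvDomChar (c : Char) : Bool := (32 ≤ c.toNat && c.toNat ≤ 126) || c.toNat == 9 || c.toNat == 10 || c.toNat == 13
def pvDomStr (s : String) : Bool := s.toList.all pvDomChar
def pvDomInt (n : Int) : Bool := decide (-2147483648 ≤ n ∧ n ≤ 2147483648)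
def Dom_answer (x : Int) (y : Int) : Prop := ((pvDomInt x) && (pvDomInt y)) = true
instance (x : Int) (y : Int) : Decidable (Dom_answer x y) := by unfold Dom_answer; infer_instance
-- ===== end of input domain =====

-- B replaces A's O(x+y) summation loop and while loop by closed-form triangular-number arithmetic (O(1)).

-- ===== PORT A =====
-- the 'while y > 1: id += x; x += 1; y -= 1' loop of A
def answerLoop (idv : Int) (x : Int) (y : Int) : Int :=
  if h : 1 < y then answerLoop (idv + x) (x + 1) (y - 1) else idv
termination_by (y - 1).toNat
decreasing_by omega

def answer (x : Int) (y : Int) : Int :=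
  let idv := (PySem.List.pyRange 0 (x + 1) 1).foldl (· + ·) 0   -- sum(range(x+1))
  if y = 1 then idv
  else if y = 2 then idv + x
  else answerLoop idv x y

-- ===== PORT B =====
def answer_alt (x : Int) (y : Int) : Int :=
  let base := if x ≥ 0 then PySem.Int.floordiv (x * (x + 1)) 2 else 0
  if y ≥ 2 then base + ((y - 1) * x + PySem.Int.floordiv ((y - 1) * (y - 2)) 2) else base

-- ===== PRECONDITION & SPEC =====
def Spec_answer (x : Int) (y : Int) (out : Int) : Prop := out = answer_alt x y
instance (x : Int) (y : Int) (out : Int) : Decidable (Spec_answer x y out) := by unfold Spec_answer; infer_instance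

-- ===== CLAIM (what is proved, stated in full; the proofs are below) =====
def Claim_equal_answer : Prop := ∀ (x : Int) (y : Int), Dom_answer x y → Spec_answer x y (answer x y)

-- ===== LEMMAS AND PROOFS =====

theorem pv_sum_range_nat (n : Nat) :
    (PySem.List.pyRange 0 ((n : Int) + 1) 1).foldl (· + ·) 0 = (n : Int) * (n + 1) / 2 := by
  induction n with
  | zero => decide
  | succ n ih =>
      have hs := PySem.List.pyRange_one_succ_right (a := 0) (b := (n : Int) + 1) (by positivity)
      push_cast
      rw [show (n : Int) + 1 + 1 = ((n : Int) + 1) + 1 from rfl, hs, List.foldl_append, ih]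
      have h2 : ((n : Int) * (n + 1)) / 2 + ((n : Int) + 1)
          = ((n : Int) * (n + 1) + ((n : Int) + 1) * 2) / 2 := by
        rw [Int.add_mul_ediv_right _ _ (by norm_num : (2 : Int) ≠ 0)]
      simp only [List.foldl]
      rw [h2]
      congr 1
      ring

theorem pv_sum_range (x : Int) :
    (PySem.List.pyRange 0 (x + 1) 1).foldl (· + ·) 0
      = if x ≥ 0 then PySem.Int.floordiv (x * (x + 1)) 2 else 0 := by
  by_cases hx : 0 ≤ x
  · obtain ⟨n, rfl⟩ := Int.eq_ofNat_of_zero_le hx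
    rw [pv_sum_range_nat n, if_pos (by exact_mod_cast hx),
        PySem.Int.floordiv_eq_ediv_of_pos (by norm_num : (0:Int) < 2)]
  · rw [if_neg (by omega), PySem.List.pyRange_one_eq_nil (by omega : x + 1 ≤ 0)]
    rfl

theorem pv_loop_eq (k : Nat) : ∀ (idv x y : Int), y - 1 ≤ (k : Int) →
    answerLoop idv x y = if 2 ≤ y then idv + ((y - 1) * x + ((y - 1) * (y - 2)) / 2) else idv := by
  induction k with
  | zero =>
      intro idv x y hy
      rw [answerLoop, dif_neg (by omega), if_neg (by omega)]
  | succ k ih =>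
      intro idv x y hy
      by_cases hy1 : 1 < y
      case neg => rw [answerLoop, dif_neg hy1, if_neg (by omega)]
      rw [answerLoop, dif_pos hy1, ih (idv + x) (x + 1) (y - 1) (by omega)]
      by_cases h2 : 2 ≤ y - 1
      · rw [if_pos h2, if_pos (by omega : 2 ≤ y)]
        have hd : ((y - 1 - 1) * (y - 1 - 2)) / 2 + (y - 2) = ((y - 1) * (y - 2)) / 2 := by
          rw [show (y - 1) * (y - 2) = (y - 1 - 1) * (y - 1 - 2) + (y - 2) * 2 from by ring,
              Int.add_mul_ediv_right _ _ (by norm_num : (2 : Int) ≠ 0)]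
        rw [← hd]
        ring
      · -- y = 2: recursion bottomed out at y - 1 = 1
        rw [if_neg h2, if_pos (by omega : 2 ≤ y)]
        have hy2 : y = 2 := by omega
        subst hy2
        norm_num

-- ===== VERDICT (by name: the statement is the Claim_ definition above) =====
theorem answer_spec : Claim_equal_answer := by
  intro x y _
  unfold Spec_answer answer answer_alt
  simp only [pv_sum_range]
  simp only [PySem.Int.floordiv_eq_ediv_of_pos (by norm_num : (0:Int) < 2)]
  by_cases h1 : y = 1
  · subst h1; norm_num
  · rw [if_neg h1]
    by_cases h2 : y = 2
    · subst h2; norm_num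
    · rw [if_neg h2]
      by_cases h3 : 2 ≤ y
      · rw [pv_loop_eq (y - 1).toNat _ x y (by omega), if_pos h3]
      · rw [pv_loop_eq (y - 1).toNat _ x y (by omega), if_neg h3]
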